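-- pv_equiv track=rewrite | github.com/djwester/salesforcifyHtmlFiles | salesforcifyHtmlFiles.py | add_span_tags_to_config
-- ===== SOURCE A (Python) =====
-- def get_config_substring(line_of_text):
--     config = 'd2l.'
--     config += line_of_text.split('d2l.')[1]
--     rebuilt_config = ''
--     for piece in config.split('.'):
--         if ' ' in piece:
--             #last element of the config
--             piece = piece.split(' ')[0]
--             rebuilt_config += piece
--             break
--         rebuilt_config += '%s.'%piece
--     if rebuilt_config.endswith('.'):
--         rebuilt_config = rebuilt_config[:-1]
--     return rebuilt_config
--
-- def add_span_tags_to_config(line_of_text):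
--     spanned_config = ''
--     config = get_config_substring(line_of_text)
--     for piece in config.split('.'):
--         spanned_config += '<span>%s</span>.'%piece
--     #remove extra . from the end
--     spanned_config = spanned_config[:-1]
--     new_line_of_text = line_of_text.replace(config,spanned_config)
--     return new_line_of_text
-- ===== SOURCE B (Python) =====
-- def add_span_tags_to_config(line_of_text):
--     config = 'd2l.' + line_of_text.split('d2l.')[1]
--     if ' ' in config:
--         config = config.split(' ')[0]
--         if config.endswith('.'):
--             config = config[:-1]
--     spanned = '.'.join('<span>%s</span>' % piece for piece in config.split('.'))
--     return line_of_text.replace(config, spanned)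
-- ===== Notes on version B (the rewrite author's own statement) =====
-- stated objective: simpler
-- what changed: Replaces A's helper's piece-by-piece accumulating loop (with early break and trailing-dot fixup) by a closed-form extraction — cut the 'd2l.'-anchored substring at the first space, strip one trailing dot — and builds the spanned string with a single '.'-join instead of an accumulator loop plus slice.
import Mathlib
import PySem

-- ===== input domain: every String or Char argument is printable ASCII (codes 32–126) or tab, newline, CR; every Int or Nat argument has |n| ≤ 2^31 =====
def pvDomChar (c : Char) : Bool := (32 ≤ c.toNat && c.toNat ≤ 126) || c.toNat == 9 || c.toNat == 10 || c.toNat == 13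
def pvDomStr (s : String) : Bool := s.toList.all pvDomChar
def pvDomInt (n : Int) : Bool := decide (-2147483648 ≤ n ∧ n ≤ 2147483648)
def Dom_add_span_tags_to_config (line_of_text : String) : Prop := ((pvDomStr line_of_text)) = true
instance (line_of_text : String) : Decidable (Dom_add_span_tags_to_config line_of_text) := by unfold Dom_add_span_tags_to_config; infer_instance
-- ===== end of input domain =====

-- B replaces A's two accumulating loops by a closed form: config = split('d2l.')[1] cut at the
-- first space (one trailing '.' stripped) and a '.'-join of the wrapped pieces; same return value.

-- ===== PORT A =====
-- the loop 'for piece in config.split('.'): …' of get_config_substring, with its early break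
def pvA_rebuildLoop : List (List Char) → List Char → List Char
  | [], acc => acc
  | piece :: rest, acc =>
    if PySem.Chars.isIn [' '] piece then
      -- piece = piece.split(' ')[0]; rebuilt_config += piece; break
      acc ++ (PySem.List.pyGet? (PySem.Chars.splitOn piece [' ']) 0).getD []
    else
      pvA_rebuildLoop rest (acc ++ (piece ++ ['.']))    -- rebuilt_config += '%s.' % piece

-- get_config_substring; line.split('d2l.')[1] raises IndexError when 'd2l.' is absent:
-- pyGet? is none there, the '.getD []' default is outside Pre_
def pvA_getConfigSubstring (line_of_text : List Char) : List Char :=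
  let config := "d2l.".toList ++ (PySem.List.pyGet? (PySem.Chars.splitOn line_of_text "d2l.".toList) 1).getD []
  let rebuilt := pvA_rebuildLoop (PySem.Chars.splitOn config ['.']) []
  if PySem.Chars.endswith rebuilt ['.'] then
    PySem.Chars.slice rebuilt none (some (-1))         -- rebuilt_config[:-1]
  else rebuilt

-- the loop 'for piece in config.split('.'): spanned_config += '<span>%s</span>.' % piece'
def pvA_spanLoop : List (List Char) → List Char → List Char
  | [], acc => acc
  | piece :: rest, acc =>
      pvA_spanLoop rest (acc ++ ("<span>".toList ++ piece ++ "</span>.".toList))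

def add_span_tags_to_config (line_of_text : String) : String :=
  let config := pvA_getConfigSubstring line_of_text.toList
  let spanned := pvA_spanLoop (PySem.Chars.splitOn config ['.']) []
  let spanned := PySem.Chars.slice spanned none (some (-1))   -- spanned_config[:-1]
  String.ofList (PySem.Chars.replace line_of_text.toList config spanned)

-- ===== PORT B =====
-- config = 'd2l.' + line.split('d2l.')[1], cut at the first space, one trailing '.' stripped
def pvB_config (line_of_text : List Char) : List Char :=
  let config := "d2l.".toList ++ (PySem.List.pyGet? (PySem.Chars.splitOn line_of_text "d2l.".toList) 1).getD []
  if PySem.Chars.isIn [' '] config then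
    let cut := (PySem.List.pyGet? (PySem.Chars.splitOn config [' ']) 0).getD []   -- config.split(' ')[0]
    if PySem.Chars.endswith cut ['.'] then PySem.Chars.slice cut none (some (-1)) else cut
  else config

def add_span_tags_to_config_alt (line_of_text : String) : String :=
  let config := pvB_config line_of_text.toList
  let spanned := PySem.Chars.join ['.']
      ((PySem.Chars.splitOn config ['.']).map (fun piece => "<span>".toList ++ piece ++ "</span>".toList))
  String.ofList (PySem.Chars.replace line_of_text.toList config spanned)

-- ===== PRECONDITION & SPEC =====
-- Pre_: 'd2l.' must occur in the line; otherwise line.split('d2l.')[1] raises IndexError in A (and in B)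
def Pre_add_span_tags_to_config (line_of_text : String) : Prop :=
  PySem.Str.isIn "d2l." line_of_text = true
instance (line_of_text : String) : Decidable (Pre_add_span_tags_to_config line_of_text) := by unfold Pre_add_span_tags_to_config; infer_instance
def pvWitness_add_span_tags_to_config : String := "var d2l.tools.lti.x = true"
def Spec_add_span_tags_to_config (line_of_text : String) (out : String) : Prop := out = add_span_tags_to_config_alt line_of_text
instance (line_of_text : String) (out : String) : Decidable (Spec_add_span_tags_to_config line_of_text out) := by unfold Spec_add_span_tags_to_config; infer_instance

-- ===== CLAIM (what is proved, stated in full; the proofs are below) =====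
def Claim_equal_add_span_tags_to_config : Prop := ∀ (line_of_text : String), Dom_add_span_tags_to_config line_of_text → Pre_add_span_tags_to_config line_of_text → Spec_add_span_tags_to_config line_of_text (add_span_tags_to_config line_of_text)

-- ===== LEMMAS AND PROOFS =====

-- PySem.Chars.splitOn with a single-character separator IS Mathlib's List.splitOn
theorem pvSplitOn_go (c : Char) : ∀ (fuel : Nat) (l cur : List Char) (acc : List (List Char)),
    l.length ≤ fuel →
    PySem.Chars.splitOn.go [c] fuel l cur acc
      = acc.reverse ++ (l.splitOn c).modifyHead (cur.reverse ++ ·) := by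
  intro fuel
  induction fuel with
  | zero =>
    intro l cur acc h
    have hl : l = [] := by cases l <;> simp_all
    subst hl
    rw [PySem.Chars.splitOn.go.eq_def]
    simp [List.splitOn]
  | succ f ih =>
    intro l cur acc h
    cases l with
    | nil =>
      rw [PySem.Chars.splitOn.go.eq_def]
      simp [List.splitOn]
    | cons x rest =>
      rw [PySem.Chars.splitOn.go.eq_def]
      simp only []
      by_cases hx : c = x
      · subst hx
        simp only [List.isPrefixOf, BEq.rfl, Bool.true_and, if_true, List.length_cons,
          List.drop_succ_cons, List.length_nil, List.drop_zero]
        rw [ih rest [] (cur.reverse :: acc) (by simpa using h)]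
        simp only [List.splitOn, List.splitOnP_cons, beq_self_eq_true, if_true, List.reverse_cons,
          List.append_assoc, List.modifyHead_cons, List.singleton_append]
        cases List.splitOnP (fun x => x == c) rest <;> simp
      · have : ([c].isPrefixOf (x :: rest)) = false := by
          simp [List.isPrefixOf, hx]
        simp only [this, Bool.false_eq_true, if_false]
        rw [ih rest (x :: cur) acc (by simpa using h)]
        have hsx : (x::rest).splitOn c = ((rest.splitOn c).modifyHead (x :: ·)) := by
          simp [List.splitOn, List.splitOnP_cons, Ne.symm hx]
        rw [hsx]
        cases hr : rest.splitOn c with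
        | nil => exact absurd hr (by simp [List.splitOn]; exact List.splitOnP_ne_nil _ _)
        | cons y ys => simp

theorem pvSplitOn_single (s : List Char) (c : Char) :
    PySem.Chars.splitOn s [c] = s.splitOn c := by
  have := pvSplitOn_go c (s.length + 1) s [] [] (by omega)
  rw [PySem.Chars.splitOn, this]
  cases h : s.splitOn c with
  | nil => exact absurd h (List.splitOnP_ne_nil _ _)
  | cons y ys => simp

theorem pvSplitOn_head (s : List Char) (c : Char) :
    (PySem.List.pyGet? (s.splitOn c) 0).getD [] = s.takeWhile (· ≠ c) := by
  induction s with
  | nil => simp [List.splitOn, PySem.List.pyGet?, PySem.List.pyIdx?]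
  | cons x t ih =>
    by_cases hx : x = c
    · subst hx; simp [List.splitOn, List.splitOnP_cons, PySem.List.pyGet?, PySem.List.pyIdx?]
    · rw [List.takeWhile_cons]
      simp only [List.splitOn, List.splitOnP_cons, beq_iff_eq, hx, if_false] at ih ⊢
      rw [if_pos (by simp [hx])]
      cases h : List.splitOnP (fun x => x == c) t with
      | nil => exact absurd h (List.splitOnP_ne_nil _ _)
      | cons y ys =>
        rw [h] at ih
        simp [PySem.List.pyGet?, PySem.List.pyIdx?] at ih ⊢
        simp [← ih]

theorem pvMem_intersperse (p : List Char) (l : List (List Char)) (sep : List Char) (hp : p ∈ l) :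
    p ∈ l.intersperse sep := by
  induction l with
  | nil => simp at hp
  | cons x t ih =>
    cases t with
    | nil => simpa using hp
    | cons y ts =>
      simp only [List.intersperse]
      rcases List.mem_cons.1 hp with h | h
      · simp [h]
      · simp only [List.mem_cons]
        right; right
        have := ih h
        simpa [List.intersperse] using this

theorem pvSplitOn_mem (s : List Char) (c : Char) :
    ∀ p ∈ s.splitOn c, ∀ a ∈ p, a ∈ s := by
  intro p hp a ha
  have : a ∈ [c].intercalate (s.splitOn c) := by
    rw [List.intercalate]
    exact List.mem_flatten.2 ⟨p, pvMem_intersperse p _ [c] hp, ha⟩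
  simpa [List.intercalate_splitOn] using this

theorem pvFlatten_concat (c : Char) (f : List Char → List Char) :
    ∀ ps : List (List Char), ps ≠ [] →
    (ps.map (fun p => f p ++ [c])).flatten = List.intercalate [c] (ps.map f) ++ [c] := by
  intro ps
  induction ps with
  | nil => simp
  | cons p t ih =>
    intro _
    cases t with
    | nil => simp [List.intercalate]
    | cons q ts =>
      rw [List.map_cons, List.flatten_cons, ih (by simp)]
      have : List.intercalate [c] (f p :: f q :: (ts.map f)) = f p ++ [c] ++ List.intercalate [c] (f q :: ts.map f) := by
        simp [List.intercalate, List.intersperse]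
      simp [this]

theorem pvIntercalate_split (c : Char) (pre : List (List Char)) (p : List Char) (rest : List (List Char)) :
    List.intercalate [c] (pre ++ p :: rest)
      = (pre.map (· ++ [c])).flatten ++ List.intercalate [c] (p :: rest) := by
  induction pre with
  | nil => simp
  | cons q t ih =>
    have : List.intercalate [c] (q :: (t ++ p :: rest)) = q ++ [c] ++ List.intercalate [c] (t ++ p :: rest) := by
      cases t <;> simp [List.intercalate, List.intersperse]
    simp [this, ih]

theorem pvTakeWhile_all (p : Char → Bool) (u v : List Char) (h : ∀ a ∈ u, p a = true) :
    (u ++ v).takeWhile p = u ++ v.takeWhile p := by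
  induction u with
  | nil => simp
  | cons x t ih =>
    rw [List.cons_append, List.takeWhile_cons, if_pos (h x (by simp)), ih (fun a ha => h a (by simp [ha]))]
    simp

theorem pvTakeWhile_stop (p : Char → Bool) (u v : List Char) (h : ∃ a ∈ u, p a = false) :
    (u ++ v).takeWhile p = u.takeWhile p := by
  induction u with
  | nil => simp at h
  | cons x t ih =>
    by_cases hx : p x
    · have : ∃ a ∈ t, p a = false := by
        rcases h with ⟨a, ha, hpa⟩
        rcases List.mem_cons.1 ha with rfl | ha'
        · simp [hx] at hpa
        · exact ⟨a, ha', hpa⟩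
      rw [List.cons_append, List.takeWhile_cons, if_pos hx, List.takeWhile_cons, if_pos hx, ih this]
    · rw [List.cons_append, List.takeWhile_cons, if_neg hx, List.takeWhile_cons, if_neg hx]

theorem pvMem_intercalate (c a : Char) (ps : List (List Char)) (h : a ∈ List.intercalate [c] ps) :
    a = c ∨ ∃ p ∈ ps, a ∈ p := by
  induction ps with
  | nil => simp [List.intercalate] at h
  | cons p t ih =>
    cases t with
    | nil =>
      simp [List.intercalate] at h
      exact Or.inr ⟨p, by simp, h⟩
    | cons q ts =>
      have : List.intercalate [c] (p :: q :: ts) = p ++ [c] ++ List.intercalate [c] (q :: ts) := by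
        simp [List.intercalate, List.intersperse]
      rw [this] at h
      simp only [List.append_assoc, List.mem_append, List.mem_cons] at h
      rcases h with h | h | h
      · exact Or.inr ⟨p, by simp, h⟩
      · exact Or.inl (by simpa using h)
      · rcases ih h with h' | ⟨r, hr, har⟩
        · exact Or.inl h'
        · exact Or.inr ⟨r, by simp [List.mem_cons.1 hr], har⟩

theorem pvFirstSpace (ps : List (List Char)) (h : ∃ p ∈ ps, ' ' ∈ p) :
    ∃ pre p rest, ps = pre ++ p :: rest ∧ (∀ q ∈ pre, ' ' ∉ q) ∧ ' ' ∈ p := by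
  induction ps with
  | nil => simp at h
  | cons x t ih =>
    by_cases hx : ' ' ∈ x
    · exact ⟨[], x, t, by simp, by simp, hx⟩
    · have : ∃ p ∈ t, ' ' ∈ p := by
        rcases h with ⟨p, hp, hsp⟩
        rcases List.mem_cons.1 hp with rfl | hp'
        · exact absurd hsp hx
        · exact ⟨p, hp', hsp⟩
      rcases ih this with ⟨pre, p, rest, heq, hpre, hp⟩
      exact ⟨x :: pre, p, rest, by simp [heq], by
        intro q hq
        rcases List.mem_cons.1 hq with rfl | hq'
        · exact hx
        · exact hpre q hq', hp⟩


-- 'a in s' for a one-character needle is list membership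
theorem pvIsIn_singleton (a : Char) (s : List Char) :
    PySem.Chars.isIn [a] s = true ↔ a ∈ s := by
  rw [PySem.Chars.isIn_iff_infix]
  exact List.singleton_infix_iff a s

theorem pvA_rebuildLoop_no_space (ps : List (List Char)) (acc : List Char)
    (h : ∀ p ∈ ps, PySem.Chars.isIn [' '] p = false) :
    pvA_rebuildLoop ps acc = acc ++ (ps.map (· ++ ['.'])).flatten := by
  induction ps generalizing acc with
  | nil => simp [pvA_rebuildLoop]
  | cons p t ih =>
    rw [pvA_rebuildLoop, if_neg (by simp [h p (by simp)])]
    rw [ih _ (fun q hq => h q (by simp [hq]))]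
    simp

theorem pvA_rebuildLoop_break (pre : List (List Char)) (p : List Char) (rest : List (List Char)) (acc : List Char)
    (hpre : ∀ q ∈ pre, PySem.Chars.isIn [' '] q = false)
    (hp : PySem.Chars.isIn [' '] p = true) :
    pvA_rebuildLoop (pre ++ p :: rest) acc
      = acc ++ (pre.map (· ++ ['.'])).flatten ++ (PySem.List.pyGet? (PySem.Chars.splitOn p [' ']) 0).getD [] := by
  induction pre generalizing acc with
  | nil => simp [pvA_rebuildLoop, hp]
  | cons q t ih =>
    rw [List.cons_append, pvA_rebuildLoop, if_neg (by simp [hpre q (by simp)])]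
    rw [ih _ (fun r hr => hpre r (by simp [hr]))]
    simp

theorem pvA_spanLoop_eq (ps : List (List Char)) (acc : List Char) :
    pvA_spanLoop ps acc
      = acc ++ (ps.map (fun p => ("<span>".toList ++ p ++ "</span>".toList) ++ ['.'])).flatten := by
  induction ps generalizing acc with
  | nil => simp [pvA_spanLoop]
  | cons p t ih =>
    rw [pvA_spanLoop, ih]
    have : "</span>.".toList = "</span>".toList ++ ['.'] := by decide
    simp [this]

-- the span builders agree on any config
theorem pvSpan_eq (config : List Char) :
    PySem.Chars.slice (pvA_spanLoop (PySem.Chars.splitOn config ['.']) []) none (some (-1))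
      = PySem.Chars.join ['.']
          ((PySem.Chars.splitOn config ['.']).map (fun piece => "<span>".toList ++ piece ++ "</span>".toList)) := by
  rw [pvA_spanLoop_eq, pvSplitOn_single]
  have h := pvFlatten_concat '.' (fun p => "<span>".toList ++ p ++ "</span>".toList)
      (config.splitOn '.') (List.splitOnP_ne_nil _ _)
  simp only [List.append_assoc] at h
  simp only [List.nil_append, List.append_assoc, PySem.Chars.slice_eq_listSlice,
    PySem.List.slice_to_neg_one]
  rw [h, List.dropLast_concat, PySem.Chars.join]

-- the heart: A's get_config_substring equals B's closed-form config
theorem pvConfigCore (t : List Char) :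
    (if PySem.Chars.endswith (pvA_rebuildLoop (PySem.Chars.splitOn t ['.']) []) ['.'] then
       PySem.Chars.slice (pvA_rebuildLoop (PySem.Chars.splitOn t ['.']) []) none (some (-1))
     else pvA_rebuildLoop (PySem.Chars.splitOn t ['.']) [])
    = (if PySem.Chars.isIn [' '] t then
         (if PySem.Chars.endswith ((PySem.List.pyGet? (PySem.Chars.splitOn t [' ']) 0).getD []) ['.'] then
            PySem.Chars.slice ((PySem.List.pyGet? (PySem.Chars.splitOn t [' ']) 0).getD []) none (some (-1))
          else (PySem.List.pyGet? (PySem.Chars.splitOn t [' ']) 0).getD [])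
       else t) := by
  rw [pvSplitOn_single t '.', pvSplitOn_single t ' ', pvSplitOn_head t ' ']
  by_cases hsp : ' ' ∈ t
  · rw [if_pos ((pvIsIn_singleton ' ' t).2 hsp)]
    -- some '.'-piece contains the space
    have hex : ∃ p ∈ t.splitOn '.', ' ' ∈ p := by
      have h1 : ' ' ∈ ['.'].intercalate (t.splitOn '.') := by
        rw [List.intercalate_splitOn]; exact hsp
      rcases pvMem_intercalate '.' ' ' _ h1 with h | h
      · exact absurd h (by decide)
      · exact h
    rcases pvFirstSpace _ hex with ⟨pre, p, rest, heq, hpre, hp⟩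
    have hpreb : ∀ q ∈ pre, PySem.Chars.isIn [' '] q = false :=
      fun q hq => Bool.eq_false_iff.2 (fun hh => hpre q hq ((pvIsIn_singleton ' ' q).1 hh))
    rw [heq, pvA_rebuildLoop_break pre p rest [] hpreb ((pvIsIn_singleton ' ' p).2 hp),
      pvSplitOn_single p ' ', pvSplitOn_head p ' ', List.nil_append]
    -- the prefix of t before the first space is exactly the rebuilt string
    have hcut : t.takeWhile (· ≠ ' ')
        = (pre.map (· ++ ['.'])).flatten ++ p.takeWhile (· ≠ ' ') := by
      have ht : t = (pre.map (· ++ ['.'])).flatten ++ List.intercalate ['.'] (p :: rest) := by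
        conv_lhs => rw [← List.intercalate_splitOn t '.', heq]
        exact pvIntercalate_split '.' pre p rest
      have hu : ∀ a ∈ (pre.map (· ++ ['.'])).flatten, decide (a ≠ ' ') = true := by
        intro a ha
        rcases List.mem_flatten.1 ha with ⟨q', hq', haq⟩
        rcases List.mem_map.1 hq' with ⟨q, hq, rfl⟩
        simp only [decide_eq_true_eq]
        rcases List.mem_append.1 haq with h | h
        · exact fun h' => hpre q hq (h' ▸ h)
        · simp only [List.mem_singleton] at h
          simp [h]
      rw [ht, pvTakeWhile_all _ _ _ hu]
      have hstop : ∃ a ∈ p, decide (a ≠ ' ') = false := ⟨' ', hp, by simp⟩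
      cases rest with
      | nil =>
        simp only [List.intercalate, List.intersperse, List.flatten]
        simp
      | cons r rs =>
        have : List.intercalate ['.'] (p :: r :: rs) = p ++ ('.' :: List.intercalate ['.'] (r :: rs)) := by
          simp [List.intercalate, List.intersperse]
        rw [this, pvTakeWhile_stop _ _ _ hstop]
    rw [← hcut]
  · -- no '.'-piece contains a space: the loop never breaks
    have hiB : PySem.Chars.isIn [' '] t = false :=
      Bool.eq_false_iff.2 (fun hh => hsp ((pvIsIn_singleton ' ' t).1 hh))
    have hnos : ∀ p ∈ t.splitOn '.', PySem.Chars.isIn [' '] p = false := by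
      intro p hpmem
      exact Bool.eq_false_iff.2 (fun hh =>
        hsp (pvSplitOn_mem t '.' p hpmem ' ' ((pvIsIn_singleton ' ' p).1 hh)))
    rw [pvA_rebuildLoop_no_space _ _ hnos, List.nil_append]
    have h := pvFlatten_concat '.' (fun p => p) (t.splitOn '.') (List.splitOnP_ne_nil _ _)
    simp only [List.map_id'] at h
    rw [h, List.intercalate_splitOn]
    rw [if_pos ((PySem.Chars.endswith_iff _ _).2 (List.suffix_append _ _))]
    simp only [PySem.Chars.slice_eq_listSlice, PySem.List.slice_to_neg_one, List.dropLast_concat,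
      hiB, Bool.false_eq_true, if_false]

theorem pvConfig_eq (l : List Char) : pvA_getConfigSubstring l = pvB_config l := by
  unfold pvA_getConfigSubstring pvB_config
  exact pvConfigCore _

-- ===== VERDICT (by name: the statement is the Claim_ definition above) =====
theorem add_span_tags_to_config_spec : Claim_equal_add_span_tags_to_config := by
  intro line _ _
  unfold Spec_add_span_tags_to_config add_span_tags_to_config add_span_tags_to_config_alt
  simp only [pvConfig_eq, pvSpan_eq]
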